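-- pv_equiv track=rewrite | github.com/carlbi/Sudoku | full_sudoku.py | hidden_in_list
-- ===== SOURCE A (Python) =====
-- def hidden_in_list(cands):
--     occurences = [None]*9
--     for num in range(9):
--         occurences[num] = [x for x in range(9) if cands[x] is not None and cands[x].count(num+1) != 0]
--         if len(occurences[num]) != 2: occurences[num] = None
--     hidden_double = list()
--     for num in range(9):
--         if occurences[num] is not None and occurences.count(occurences[num]) > 1:
--             hidden_double.append(num+1)
--     return hidden_double
-- ===== SOURCE B (Python) =====
-- def hidden_in_list(cands):
--     # Transposed build: one pass over the 9 cells distributes each candidate value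
--     # into its number's position list (instead of 9 per-number scans with .count).
--     positions = [[] for _ in range(9)]
--     for x in range(9):
--         cell = cands[x]
--         if cell is None:
--             continue
--         for v in cell:
--             if 1 <= v <= 9:
--                 p = positions[v - 1]
--                 if not p or p[-1] != x:
--                     p.append(x)
--     # Group numbers by their position-pair; emit whole groups of size >= 2, then sort.
--     groups = {}
--     for num in range(9):
--         p = positions[num]
--         if len(p) == 2:
--             groups.setdefault((p[0], p[1]), []).append(num + 1)
--     out = []
--     for nums in groups.values():
--         if len(nums) >= 2:
--             out.extend(nums)
--     return sorted(out)
-- ===== Notes on version B (the rewrite author's own statement) =====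
-- stated objective: alternative
-- what changed: B inverts the first phase into a single cell-major pass that distributes each cell's values into per-number position lists (no .count scans), then groups numbers by their position-pair in a dict, emits every group of size >= 2 whole, and sorts the collected numbers, instead of A's 9 per-number scans plus a per-number occurences.count rescan.
import Mathlib
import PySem

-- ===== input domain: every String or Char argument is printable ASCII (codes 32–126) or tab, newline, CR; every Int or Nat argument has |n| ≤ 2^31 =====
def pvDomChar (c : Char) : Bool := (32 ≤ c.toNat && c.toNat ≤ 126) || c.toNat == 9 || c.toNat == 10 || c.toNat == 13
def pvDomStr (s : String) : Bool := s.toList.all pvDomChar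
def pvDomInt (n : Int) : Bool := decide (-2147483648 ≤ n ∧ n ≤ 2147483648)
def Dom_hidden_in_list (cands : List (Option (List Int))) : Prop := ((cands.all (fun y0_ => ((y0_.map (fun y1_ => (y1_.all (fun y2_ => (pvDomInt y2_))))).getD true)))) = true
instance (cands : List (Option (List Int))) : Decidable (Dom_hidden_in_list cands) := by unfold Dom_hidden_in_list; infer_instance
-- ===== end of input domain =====

-- B replaces A's nine per-number `.count` scans by one cell-major pass distributing each
-- cell's values into per-number position lists, then groups numbers by position-pair in a
-- dict, emits groups of size ≥ 2 whole, and sorts (alternative decomposition, same result).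

-- ===== PORT A =====
-- the comprehension '[x for x in range(9) if cands[x] is not None and cands[x].count(num+1) != 0]'
def posList (cands : List (Option (List Int))) (num : Int) : List Int :=
  (PySem.List.pyRange 0 9 1).filter (fun x =>
    match PySem.List.pyGet? cands x with
    | some (some l) => decide (PySem.List.count l (num + 1) ≠ 0)
    | _ => false)

def hidden_in_list (cands : List (Option (List Int))) : List Int :=
  let occurences : List (Option (List Int)) :=
    (PySem.List.pyRange 0 9 1).map (fun num =>
      let occ := posList cands num
      if occ.length ≠ 2 then none else some occ)
  (PySem.List.pyRange 0 9 1).foldl (fun hidden_double num =>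
    match PySem.List.pyGetD occurences num none with
    | none => hidden_double
    | some p =>
        if 1 < PySem.List.count occurences (some p) then hidden_double ++ [num + 1]
        else hidden_double) []

-- ===== PORT B =====
-- 'if not p or p[-1] != x: p.append(x)'
def pvAppendStep (x : Int) (p : List Int) : List Int :=
  if p = [] ∨ PySem.List.pyGet? p (-1) ≠ some x then p ++ [x] else p
-- the body of 'for v in cell:' (the guard 1 <= v <= 9 makes v-1 a valid 0..8 index, so '.toNat' is exact here)
def pvCellStep (x : Int) (positions : List (List Int)) (v : Int) : List (List Int) :=
  if 1 ≤ v ∧ v ≤ 9 then positions.modify (v - 1).toNat (pvAppendStep x) else positions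

-- one iteration of 'for x in range(9)': cell = cands[x]; a None cell is skipped
def pvCellLoop (cands : List (Option (List Int))) (positions : List (List Int)) (x : Int) :
    List (List Int) :=
  match PySem.List.pyGet? cands x with
  | some (some cell) => cell.foldl (pvCellStep x) positions
  | _ => positions

def hidden_in_list_alt (cands : List (Option (List Int))) : List Int :=
  let positions0 : List (List Int) := (List.range 9).map (fun _ => [])
  let positions := (PySem.List.pyRange 0 9 1).foldl (pvCellLoop cands) positions0
  let groups : PySem.Dict (Int × Int) (List Int) :=
    (PySem.List.pyRange 0 9 1).foldl (fun groups num =>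
      let p := PySem.List.pyGetD positions num []
      if p.length = 2 then
        PySem.Dict.modify groups (PySem.List.pyGetD p 0 0, PySem.List.pyGetD p 1 0) []
          (fun q => q ++ [num + 1])
      else groups) PySem.Dict.empty
  let out := (PySem.Dict.values groups).foldl (fun out nums =>
    if 2 ≤ nums.length then out ++ nums else out) []
  PySem.List.sorted out (fun x => x)

-- ===== PRECONDITION & SPEC =====
-- A and B index cands[x] for x in range(9): both raise IndexError iff cands has fewer than 9 cells.
def Pre_hidden_in_list (cands : List (Option (List Int))) : Prop := 9 ≤ cands.length
instance (cands : List (Option (List Int))) : Decidable (Pre_hidden_in_list cands) := by unfold Pre_hidden_in_list; infer_instance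

def pvWitness_hidden_in_list : List (Option (List Int)) :=
  [some [1, 2], some [1, 2], none, some [3], none, none, none, none, none]

def Spec_hidden_in_list (cands : List (Option (List Int))) (out : List Int) : Prop := out = hidden_in_list_alt cands
instance (cands : List (Option (List Int))) (out : List Int) : Decidable (Spec_hidden_in_list cands out) := by unfold Spec_hidden_in_list; infer_instance

-- ===== CLAIM (what is proved, stated in full; the proofs are below) =====
def Claim_equal_hidden_in_list : Prop := ∀ (cands : List (Option (List Int))), Dom_hidden_in_list cands → Pre_hidden_in_list cands → Spec_hidden_in_list cands (hidden_in_list cands)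

-- ===== LEMMAS AND PROOFS =====

theorem pvGetLast (p : List Int) : PySem.List.pyGet? p (-1) = p.getLast? := by
  cases p with
  | nil => rfl
  | cons a t => simp [PySem.List.pyGet?, PySem.List.pyIdx?, List.getLast?_eq_getElem?]

theorem pvCellFold_length (x : Int) (cell : List Int) (T : List (List Int)) :
    (cell.foldl (pvCellStep x) T).length = T.length := by
  induction cell generalizing T with
  | nil => rfl
  | cons v rest ih =>
    rw [List.foldl_cons, ih]
    unfold pvCellStep
    split <;> simp [List.length_modify]

theorem pvAppend_clean (x : Int) (p : List Int) (h : x ∉ p) :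
    pvAppendStep x p = p ++ [x] := by
  unfold pvAppendStep
  rw [if_pos]
  cases p with
  | nil => left; rfl
  | cons a t =>
    right
    rw [pvGetLast]
    intro hc
    exact h (List.mem_of_getLast? hc)

theorem pvAppend_done (x : Int) (p : List Int) (h : p.getLast? = some x) :
    pvAppendStep x p = p := by
  unfold pvAppendStep
  rw [if_neg]
  rintro (rfl | hne)
  · simp at h
  · exact hne (by rw [pvGetLast, h])

theorem pvCellFold_get (x : Int) (cell : List Int) : ∀ (T : List (List Int)) (hT : T.length = 9),
    (∀ n : Nat, ∀ (hn : n < 9), x ∉ T[n]'(by omega) ∨ (T[n]'(by omega)).getLast? = some x) →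
    ∀ n : Nat, ∀ (hn : n < 9),
    (cell.foldl (pvCellStep x) T)[n]'(by rw [pvCellFold_length]; omega) =
      if ((n : Int) + 1) ∈ cell ∧ x ∉ T[n]'(by omega) then T[n]'(by omega) ++ [x]
      else T[n]'(by omega) := by
  induction cell with
  | nil => intro T hT hyp n hn; simp
  | cons v rest ih =>
    intro T hT hyp n hn
    simp only [List.foldl_cons]
    by_cases hv : 1 ≤ v ∧ v ≤ 9
    · have hj : (v - 1).toNat < 9 := by omega
      have hstep : pvCellStep x T v = T.modify (v - 1).toNat (pvAppendStep x) := by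
        unfold pvCellStep; rw [if_pos hv]
      have hT' : (pvCellStep x T v).length = 9 := by rw [hstep, List.length_modify, hT]
      have hget : ∀ m : Nat, ∀ (hm : m < 9), (pvCellStep x T v)[m]'(by omega) =
          if (v - 1).toNat = m then pvAppendStep x (T[m]'(by omega)) else T[m]'(by omega) := by
        intro m hm
        simp only [hstep, List.getElem_modify]
      have hyp' : ∀ m : Nat, ∀ (hm : m < 9), x ∉ (pvCellStep x T v)[m]'(by omega) ∨
          ((pvCellStep x T v)[m]'(by omega)).getLast? = some x := by
        intro m hm
        rw [hget m hm]
        split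
        · rcases hyp m hm with hc | hd
          · rw [pvAppend_clean x _ hc]; right; simp
          · rw [pvAppend_done x _ hd]; right; exact hd
        · exact hyp m hm
      rw [ih (pvCellStep x T v) hT' hyp' n hn, hget n hn]
      by_cases hjn : (v - 1).toNat = n
      · have hvn : v = (n : Int) + 1 := by omega
        rcases hyp n hn with hc | hd
        · rw [if_pos hjn, pvAppend_clean x _ hc]
          have : x ∉ T[n]'(by omega) ++ [x] → False := by simp
          rw [if_neg (by intro h; exact this h.2)]
          rw [if_pos ⟨by simp [hvn], hc⟩]
        · have hxin : x ∈ T[n]'(by omega) := List.mem_of_getLast? hd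
          rw [if_pos hjn, pvAppend_done x _ hd]
          rw [if_neg (by intro h; exact h.2 hxin), if_neg (by intro h; exact h.2 hxin)]
      · have hvn : v ≠ (n : Int) + 1 := by omega
        rw [if_neg hjn]
        have : ((n : Int) + 1) ∈ v :: rest ↔ ((n : Int) + 1) ∈ rest := by
          simp [hvn.symm]
        simp only [this]
    · have hstep : pvCellStep x T v = T := by unfold pvCellStep; rw [if_neg hv]
      simp only [hstep]
      rw [ih T hT hyp n hn]
      have hvn : v ≠ (n : Int) + 1 := by omega
      have : ((n : Int) + 1) ∈ v :: rest ↔ ((n : Int) + 1) ∈ rest := by simp [hvn.symm]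
      simp only [this]
def pvMemB (cands : List (Option (List Int))) (x : Int) (n : Nat) : Bool :=
  match PySem.List.pyGet? cands x with
  | some (some cell) => decide (((n : Int) + 1) ∈ cell)
  | _ => false

theorem pvOuterFold_length (cands : List (Option (List Int))) (xs : List Int)
    (T : List (List Int)) : (xs.foldl (pvCellLoop cands) T).length = T.length := by
  induction xs generalizing T with
  | nil => rfl
  | cons x rest ih =>
    simp only [List.foldl_cons]
    rw [ih]
    unfold pvCellLoop
    split
    · rw [pvCellFold_length]
    · rfl

theorem pvOuterFold_get (cands : List (Option (List Int))) : ∀ (xs : List Int)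
    (T : List (List Int)) (hT : T.length = 9), List.Pairwise (· < ·) xs →
    (∀ n : Nat, ∀ (hn : n < 9), ∀ y ∈ T[n]'(by omega), ∀ x ∈ xs, y < x) →
    ∀ n : Nat, ∀ (hn : n < 9),
    (xs.foldl (pvCellLoop cands) T)[n]'(by rw [pvOuterFold_length]; omega) =
      T[n]'(by omega) ++ xs.filter (fun x => pvMemB cands x n) := by
  intro xs
  induction xs with
  | nil => intro T hT _ _ n hn; simp
  | cons x rest ih =>
    intro T hT hs hinv n hn
    simp only [List.foldl_cons, List.filter_cons]
    have hT' : (pvCellLoop cands T x).length = 9 := by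
      unfold pvCellLoop
      split
      · rw [pvCellFold_length, hT]
      · rw [hT]
    have hxrest : ∀ z ∈ rest, x < z := by
      intro z hz; exact (List.pairwise_cons.mp hs).1 z hz
    have hsrest : List.Pairwise (· < ·) rest := (List.pairwise_cons.mp hs).2
    have hget : ∀ m : Nat, ∀ (hm : m < 9), (pvCellLoop cands T x)[m]'(by omega) =
        if pvMemB cands x m then T[m]'(by omega) ++ [x] else T[m]'(by omega) := by
      intro m hm
      cases hc : PySem.List.pyGet? cands x with
      | none => simp [pvCellLoop, pvMemB, hc]
      | some oc =>
        cases oc with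
        | none => simp [pvCellLoop, pvMemB, hc]
        | some cell =>
          simp only [pvCellLoop, pvMemB, hc]
          have hclean : x ∉ T[m]'(by omega) := by
            intro hx
            exact absurd (hinv m hm x hx x (by simp)) (lt_irrefl x)
          rw [pvCellFold_get x cell T hT (fun k hk => Or.inl (by
            intro hx; exact absurd (hinv k hk x hx x (by simp)) (lt_irrefl x))) m hm]
          by_cases hmem : ((m : Int) + 1) ∈ cell
          · rw [if_pos ⟨hmem, hclean⟩, if_pos (by simpa using hmem)]
          · rw [if_neg (by intro h; exact hmem h.1), if_neg (by simpa using hmem)]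
    have hinv' : ∀ m : Nat, ∀ (hm : m < 9), ∀ y ∈ (pvCellLoop cands T x)[m]'(by omega),
        ∀ z ∈ rest, y < z := by
      intro m hm y hy z hz
      rw [hget m hm] at hy
      by_cases hb : pvMemB cands x m
      · rw [if_pos hb] at hy
        rcases List.mem_append.mp hy with h1 | h2
        · exact lt_trans (hinv m hm y h1 x (by simp)) (hxrest z hz)
        · simp at h2; subst h2; exact hxrest z hz
      · rw [if_neg hb] at hy
        exact lt_trans (hinv m hm y hy x (by simp)) (hxrest z hz)
    rw [ih (pvCellLoop cands T x) hT' hsrest hinv' n hn, hget n hn]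
    by_cases hb : pvMemB cands x n
    · rw [if_pos hb, if_pos hb]; simp
    · rw [if_neg hb, if_neg hb]

theorem pvPositions_get (cands : List (Option (List Int))) (n : Nat) (hn : n < 9) :
    (((PySem.List.pyRange 0 9 1).foldl (pvCellLoop cands) ((List.range 9).map (fun _ => ([] : List Int))))[n]'(by rw [pvOuterFold_length]; simpa using hn))
      = posList cands (n : Int) := by
  rw [pvOuterFold_get cands (PySem.List.pyRange 0 9 1) _ (by simp) (by decide)
    (by intro m hm y hy; exfalso; interval_cases m <;> simp_all) n hn]
  have h0 : ((List.range 9).map (fun _ => ([] : List Int)))[n]'(by simpa using hn) = [] := by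
    interval_cases n <;> rfl
  rw [h0, List.nil_append]
  unfold posList
  refine List.filter_congr ?_
  intro x hx
  unfold pvMemB
  cases hc : PySem.List.pyGet? cands x with
  | none => rfl
  | some oc =>
    cases oc with
    | none => rfl
    | some cell =>
      simp only [PySem.List.count_eq]
      by_cases h : ((n : Int) + 1) ∈ cell <;> simp [h, List.count_eq_zero]
def pvKey (l : List Int) : Int × Int := (PySem.List.pyGetD l 0 0, PySem.List.pyGetD l 1 0)

def pvAGood (cands : List (Option (List Int))) (n : Int) : Bool :=
  decide ((posList cands n).length = 2) &&
  decide (1 < List.countP (fun m => decide ((posList cands m).length = 2) && (posList cands m == posList cands n)) (PySem.List.pyRange 0 9 1))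

def pvPairs (cands : List (Option (List Int))) : List ((Int × Int) × Int) :=
  ((PySem.List.pyRange 0 9 1).filter (fun n => decide ((posList cands n).length = 2))).map
    (fun n => (pvKey (posList cands n), n + 1))

def pvQ (cands : List (Option (List Int))) (kv : (Int × Int) × Int) : Bool :=
  decide (2 ≤ List.countP (fun kv' => kv'.1 == kv.1) (pvPairs cands))

theorem pvKey_eq_iff (l l' : List Int) (h : l.length = 2) (h' : l'.length = 2) :
    pvKey l = pvKey l' ↔ l = l' := by
  obtain ⟨a, b, rfl⟩ := List.length_eq_two.mp h
  obtain ⟨c, d, rfl⟩ := List.length_eq_two.mp h'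
  simp [pvKey, PySem.List.pyGetD, PySem.List.pyGet?, PySem.List.pyIdx?, Prod.ext_iff]

theorem pvA_eq (cands : List (Option (List Int))) :
    hidden_in_list cands =
      ((PySem.List.pyRange 0 9 1).filter (pvAGood cands)).map (fun n => n + 1) := by
  simp only [hidden_in_list]
  rw [PySem.List.foldl_congr_mem' (g := fun acc num => if pvAGood cands num then acc ++ [num + 1] else acc)]
  · rw [PySem.List.foldl_append_if]; simp
  · intro num hmem acc
    obtain ⟨h0, h9⟩ := (PySem.List.mem_pyRange_one).mp hmem
    rw [PySem.List.pyGetD_map_pyRange_of_nonneg _ 9 num none h0 h9]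
    by_cases hq : (posList cands num).length = 2
    · simp only [hq]
      have hcnt : PySem.List.count
            (List.map (fun num => if (posList cands num).length ≠ 2 then none else some (posList cands num))
              (PySem.List.pyRange 0 9 1))
            (some (posList cands num)) =
          List.countP (fun m => decide ((posList cands m).length = 2) && (posList cands m == posList cands num))
            (PySem.List.pyRange 0 9 1) := by
        rw [PySem.List.count_eq, List.count_eq_countP, List.countP_map]
        refine List.countP_congr ?_
        intro m _
        by_cases hm : (posList cands m).length = 2 <;> simp [hm, Function.comp]
      simp only [pvAGood, hq, ne_eq, not_true_eq_false, if_false, hcnt]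
      by_cases hc : 1 < List.countP (fun m => decide ((posList cands m).length = 2) && (posList cands m == posList cands num)) (PySem.List.pyRange 0 9 1) <;> simp [hc]
    · simp [hq, pvAGood]

theorem pvA_eq_pairs (cands : List (Option (List Int))) :
    hidden_in_list cands = ((pvPairs cands).filter (pvQ cands)).map (fun kv => kv.2) := by
  rw [pvA_eq]
  unfold pvPairs
  rw [List.filter_map, List.map_map]
  rw [List.filter_filter]
  congr 1
  refine List.filter_congr ?_
  intro n _
  by_cases hq : (posList cands n).length = 2
  · have hcnt : List.countP (fun kv' => kv'.1 == pvKey (posList cands n)) (pvPairs cands) =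
        List.countP (fun m => decide ((posList cands m).length = 2) && (posList cands m == posList cands n)) (PySem.List.pyRange 0 9 1) := by
      unfold pvPairs
      rw [List.countP_map, List.countP_filter]
      refine List.countP_congr ?_
      intro m _
      by_cases hm : (posList cands m).length = 2
      · simp only [hm, decide_true, Bool.and_true, Bool.true_and, Function.comp_apply]
        by_cases he : posList cands m = posList cands n
        · simp [he]
        · have hk : pvKey (posList cands m) ≠ pvKey (posList cands n) :=
            fun hk => he ((pvKey_eq_iff _ _ hm hq).mp hk)
          simp [he, hk]
      · simp [hm, Function.comp]
    simp only [pvQ, Function.comp_apply, pvAGood, hq, decide_true, Bool.true_and, Bool.and_true, hcnt]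
    rw [decide_eq_decide]
    omega
  · simp [pvAGood, hq, Function.comp]

theorem pvPartition_perm {κ ν : Type} [BEq κ] [LawfulBEq κ] : ∀ (ks : List κ) (m : List (κ × ν)),
    ks.Nodup → (∀ kv ∈ m, kv.1 ∈ ks) →
    (ks.flatMap (fun k => m.filter (fun kv => kv.1 == k))).Perm m := by
  intro ks
  induction ks with
  | nil =>
    intro m _ hall
    have : m = [] := by
      cases m with
      | nil => rfl
      | cons a t => exact absurd (hall a (by simp)) (by simp)
    simp [this]
  | cons k ks ih =>
    intro m hnd hall
    rw [List.flatMap_cons]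
    have hkk : k ∉ ks := (List.nodup_cons.mp hnd).1
    have htail : ∀ k' ∈ ks, m.filter (fun kv => kv.1 == k') =
        (m.filter (fun kv => !(kv.1 == k))).filter (fun kv => kv.1 == k') := by
      intro k' hk'
      rw [List.filter_filter]
      refine (List.filter_congr ?_).symm
      intro kv _
      by_cases h : kv.1 = k'
      · have hk'k : k' ≠ k := by rintro rfl; exact hkk hk'
        simp [h, hk'k]
      · simp [h]
    have hrw : ks.flatMap (fun k' => m.filter (fun kv => kv.1 == k')) =
        ks.flatMap (fun k' => (m.filter (fun kv => !(kv.1 == k))).filter (fun kv => kv.1 == k')) := by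
      refine List.flatMap_congr ?_
      intro k' hk'
      exact htail k' hk'
    rw [hrw]
    have hperm := ih (m.filter (fun kv => !(kv.1 == k))) (List.nodup_cons.mp hnd).2 (by
      intro kv hkv
      have h1 := List.of_mem_filter hkv
      have h2 := hall kv (List.mem_of_mem_filter hkv)
      simp at h1
      rcases List.mem_cons.mp h2 with h | h
      · exact absurd h h1
      · exact h)
    exact (List.Perm.append_left _ hperm).trans (List.filter_append_perm _ m)
def pvG (cands : List (Option (List Int))) : PySem.Dict (Int × Int) (List Int) :=
  (pvPairs cands).foldl (fun d kv => PySem.Dict.modify d kv.1 [] (fun q => q ++ [kv.2]))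
    PySem.Dict.empty

theorem pvGroups_eq (cands : List (Option (List Int))) :
    ((PySem.List.pyRange 0 9 1).foldl (fun groups num =>
      let p := PySem.List.pyGetD ((PySem.List.pyRange 0 9 1).foldl (pvCellLoop cands)
        ((List.range 9).map (fun _ => ([] : List Int)))) num []
      if p.length = 2 then
        PySem.Dict.modify groups (PySem.List.pyGetD p 0 0, PySem.List.pyGetD p 1 0) []
          (fun q => q ++ [num + 1])
      else groups) PySem.Dict.empty) = pvG cands := by
  rw [PySem.List.foldl_congr_mem' (g := fun groups num =>
    if (posList cands num).length = 2 then
      PySem.Dict.modify groups (pvKey (posList cands num)) [] (fun q => q ++ [num + 1])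
    else groups)]
  · rw [PySem.List.foldl_ite_eq_foldl_filter
      (p := fun num => (posList cands num).length = 2)
      (f := fun groups num => PySem.Dict.modify groups (pvKey (posList cands num)) [] (fun q => q ++ [num + 1]))]
    unfold pvG pvPairs
    rw [List.foldl_map]
  · intro num hmem groups
    obtain ⟨h0, h9⟩ := PySem.List.mem_pyRange_one.mp hmem
    have hlen : ((PySem.List.pyRange 0 9 1).foldl (pvCellLoop cands)
        ((List.range 9).map (fun _ => ([] : List Int)))).length = 9 := by
      rw [pvOuterFold_length]; simp
    have hp : PySem.List.pyGetD ((PySem.List.pyRange 0 9 1).foldl (pvCellLoop cands)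
        ((List.range 9).map (fun _ => ([] : List Int)))) num [] = posList cands num := by
      rw [PySem.List.pyGetD_of_nonneg _ _ h0]
      rw [List.getD_eq_getElem _ _ (by rw [hlen]; omega)]
      rw [pvPositions_get cands num.toNat (by omega)]
      congr 1
      omega
    simp only [hp]
    rfl

theorem pvB_presort (cands : List (Option (List Int))) :
    hidden_in_list_alt cands =
      PySem.List.sorted
        ((PySem.Set.ofList ((pvPairs cands).map (fun kv => kv.1))).flatMap
          (fun k => (((pvPairs cands).filter (pvQ cands)).filter (fun kv => kv.1 == k)).map (fun kv => kv.2)))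
        (fun x => x) := by
  simp only [hidden_in_list_alt]
  rw [pvGroups_eq cands]
  have hnodup : (pvG cands).keys.Nodup := by
    unfold pvG
    exact PySem.Dict.nodup_keys_foldl_modify_key (pvPairs cands) (fun kv => kv.1) []
      (fun d kv => fun q => q ++ [kv.2]) PySem.Dict.empty (by simp)
  have hkeys : (pvG cands).keys = PySem.Set.ofList ((pvPairs cands).map (fun kv => kv.1)) := by
    unfold pvG
    rw [PySem.Dict.keys_foldl_modify_key (pvPairs cands) (fun kv => kv.1) []
      (fun d kv => fun q => q ++ [kv.2]) PySem.Dict.empty]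
    rfl
  have hgetD : ∀ k, (pvG cands).getD k [] =
      ((pvPairs cands).filter (fun kv => kv.1 == k)).map (fun kv => kv.2) := by
    intro k
    unfold pvG
    rw [PySem.Dict.getD_foldl_modify_append]
    simp [PySem.Dict.getD_empty]
  rw [PySem.Dict.values_eq_map_keys (pvG cands) hnodup []]
  rw [PySem.List.foldl_congr_mem' (g := fun out nums =>
    out ++ (if 2 ≤ nums.length then nums else [])) (h := by
      intro nums _ out
      by_cases h : 2 ≤ nums.length <;> simp [h])]
  rw [PySem.List.foldl_append_eq_flatMap]
  rw [List.flatMap_map, List.nil_append, hkeys]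
  congr 1
  refine List.flatMap_congr ?_
  intro k hk
  rw [hgetD k]
  have hlen : (((pvPairs cands).filter (fun kv => kv.1 == k)).map (fun kv => kv.2)).length =
      List.countP (fun kv => kv.1 == k) (pvPairs cands) := by
    rw [List.length_map, List.countP_eq_length_filter]
  by_cases hc : 2 ≤ List.countP (fun kv => kv.1 == k) (pvPairs cands)
  · rw [if_pos (by rw [hlen]; exact hc)]
    congr 1
    rw [List.filter_filter]
    refine (List.filter_congr ?_).symm
    intro kv _
    by_cases hkv : kv.1 = k
    · have : pvQ cands kv = true := by
        unfold pvQ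
        simp only [hkv, decide_eq_true_eq]
        exact hc
      simp [hkv, this]
    · simp [hkv]
  · rw [if_neg (by rw [hlen]; exact hc)]
    symm
    rw [List.map_eq_nil_iff, List.filter_eq_nil_iff]
    intro kv hkv
    have h1 : pvQ cands kv = true := (List.mem_filter.mp hkv).2
    simp only [beq_iff_eq]
    rintro rfl
    unfold pvQ at h1
    simp only [decide_eq_true_eq] at h1
    exact hc h1

theorem hidden_in_list_spec_aux (cands : List (Option (List Int))) :
    hidden_in_list cands = hidden_in_list_alt cands := by
  rw [pvB_presort cands]
  symm
  apply PySem.List.sorted_eq_of_perm_of_pairwise_lt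
  · rw [pvA_eq_pairs]
    rw [← List.map_flatMap]
    refine (List.Perm.map _ ?_).symm
    refine pvPartition_perm _ _ (PySem.Set.nodup_ofList ((pvPairs cands).map (fun kv => kv.1))) ?_
    intro kv hkv
    rw [PySem.Set.mem_ofList]
    exact List.mem_map_of_mem (List.mem_of_mem_filter hkv)
  · rw [pvA_eq]
    rw [List.pairwise_map]
    refine List.Pairwise.filter _ ?_
    refine List.Pairwise.imp ?_ (by decide : List.Pairwise (· < ·) (PySem.List.pyRange 0 9 1))
    intro a b hab
    omega

-- ===== VERDICT (by name: the statement is the Claim_ definition above) =====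
theorem hidden_in_list_spec : Claim_equal_hidden_in_list := by
  intro cands _ hpre
  unfold Spec_hidden_in_list
  exact hidden_in_list_spec_aux cands
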